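-- pv_equiv track=rewrite | github.com/AggarwalAnshul/Dynamic-Programming | FindNumberEndlessPoints.py | findNumberofEndlessPoints
-- ===== SOURCE A (Python) =====
-- def findNumberofEndlessPoints(matrix):
--     rows = len(matrix)
--     cols = len(matrix[0])
--     countMax = 0
--     dp = [[0]*(cols+1) for x in range(rows+1)]
--
--     #init
--     for x in range(cols+1):
--         dp[rows][x] = 2
--     for x in range(rows+1):
--         dp[x][cols] = 1
--
--     #population
--     for i in reversed(range(rows)):
--         for j in reversed(range(cols)):
--             #checking for rows
--             if(dp[i][j+1]==1 or dp[i][j+1]==3):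
--                 if(matrix[i][j]==1):
--                     dp[i][j] = 1 #marks the row path as clear for endless path
--             #checking for column
--             if(dp[i+1][j]==2 or dp[i+1][j]==3):
--                 if(matrix[i][j] == 1):
--                     if(dp[i][j]==1): #when both row and col are clear for endless path
--                         dp[i][j] = 3
--                     else:
--                         dp[i][j] = 2 #marks the col path as clear for endless path
--             if(dp[i][j] == 3):  #counts the toatl number of endless points
--                 countMax+=1
--             #pm.printMatrix(dp) #DEBUG: Prints the matrix
--     return countMax
-- ===== SOURCE B (Python) =====
-- def findNumberofEndlessPoints(matrix):
--     rows = len(matrix)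
--     cols = len(matrix[0])
--     # a cell is "endless" iff its column index is at/after the row's last non-1
--     # entry and its row index is at/after the column's last non-1 entry
--     rstart = []
--     for row in matrix:
--         s = 0
--         for j in range(cols):
--             if row[j] != 1:
--                 s = j + 1
--         rstart.append(s)
--     cstart = []
--     for j in range(cols):
--         s = 0
--         for i in range(rows):
--             if matrix[i][j] != 1:
--                 s = i + 1
--         cstart.append(s)
--     return sum(1 for i in range(rows) for j in range(cols)
--                if rstart[i] <= j and cstart[j] <= i)
-- ===== Notes on version B (the rewrite author's own statement) =====
-- stated objective: alternative
-- what changed: Replaced A's bottom-up DP over a sentinel-initialized (rows+1)x(cols+1) table with 0/1/2/3 state codes by a closed-form threshold characterization: forward scans record each row's and each column's last non-1 index, and a cell is counted iff its column index is past the row threshold and its row index past the column threshold; no DP propagation at all.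
import Mathlib
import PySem

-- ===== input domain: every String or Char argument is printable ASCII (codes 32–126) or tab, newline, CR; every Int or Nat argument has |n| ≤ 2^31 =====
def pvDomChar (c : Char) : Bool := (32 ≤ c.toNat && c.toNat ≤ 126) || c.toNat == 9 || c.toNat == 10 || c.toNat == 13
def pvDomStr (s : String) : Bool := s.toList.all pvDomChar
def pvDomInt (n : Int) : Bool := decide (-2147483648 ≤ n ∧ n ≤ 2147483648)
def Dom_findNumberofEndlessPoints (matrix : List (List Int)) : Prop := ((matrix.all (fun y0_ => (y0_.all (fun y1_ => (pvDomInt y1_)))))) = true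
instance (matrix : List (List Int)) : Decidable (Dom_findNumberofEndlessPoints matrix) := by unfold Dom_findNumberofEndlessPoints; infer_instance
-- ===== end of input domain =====

-- B drops A's bottom-up DP table entirely: it records each row's and each column's
-- last non-1 index by forward scans and counts cells past both thresholds (objective: alternative).

-- ===== PORT A =====
-- dp[i][j] read / write (indices are always in range in A's code; getD defaults never fire under Pre_)
def pvGet2 (dp : List (List Int)) (i j : Nat) : Int := (dp.getD i []).getD j 0
def pvSet2 (dp : List (List Int)) (i j : Nat) (v : Int) : List (List Int) := dp.set i ((dp.getD i []).set j v)
def pvMGet (matrix : List (List Int)) (i j : Nat) : Int := (matrix.getD i []).getD j 0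

-- body of A's inner 'for j' loop, state = (dp, countMax)
def pvInnerA (matrix : List (List Int)) (i : Nat) (st : List (List Int) × Int) (j : Nat) : List (List Int) × Int :=
  let dp1 := if pvGet2 st.1 i (j+1) == 1 || pvGet2 st.1 i (j+1) == 3 then
               (if pvMGet matrix i j == 1 then pvSet2 st.1 i j 1 else st.1) else st.1
  let dp2 := if pvGet2 dp1 (i+1) j == 2 || pvGet2 dp1 (i+1) j == 3 then
               (if pvMGet matrix i j == 1 then
                  (if pvGet2 dp1 i j == 1 then pvSet2 dp1 i j 3 else pvSet2 dp1 i j 2) else dp1) else dp1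
  (dp2, if pvGet2 dp2 i j == 3 then st.2 + 1 else st.2)

-- len(matrix[0]) is ported as (matrix.headD []).length; Python raises IndexError on [], excluded by Pre_
def findNumberofEndlessPoints (matrix : List (List Int)) : Int :=
  let rows := matrix.length
  let cols := (matrix.headD []).length
  let dp0 : List (List Int) := (List.range (rows+1)).map (fun _ => List.replicate (cols+1) (0:Int))
  let dp1 := (List.range (cols+1)).foldl (fun dp x => pvSet2 dp rows x 2) dp0
  let dp2 := (List.range (rows+1)).foldl (fun dp x => pvSet2 dp x cols 1) dp1
  let st := ((List.range rows).reverse).foldl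
      (fun st i => ((List.range cols).reverse).foldl (pvInnerA matrix i) st) (dp2, (0:Int))
  st.2

-- ===== PORT B =====
-- B's inner scan 'for t in range(n): if v(t) != 1: s = t+1' (used for one row or one column)
def pvScanLast (n : Nat) (f : Nat → Int) : Nat :=
  (List.range n).foldl (fun s t => if f t ≠ 1 then t + 1 else s) 0

def findNumberofEndlessPoints_alt (matrix : List (List Int)) : Int :=
  let rows := matrix.length
  let cols := (matrix.headD []).length
  let rstart := matrix.map (fun row => pvScanLast cols (fun j => row.getD j 0))
  let cstart := (List.range cols).map (fun j => pvScanLast rows (fun i => pvMGet matrix i j))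
  (List.range rows).foldl (fun acc i =>
    acc + (((List.range cols).filter
      (fun j => decide (rstart.getD i 0 ≤ j) && decide (cstart.getD j 0 ≤ i))).length : Int)) 0

-- ===== PRECONDITION & SPEC =====
-- Pre_ excludes exactly the inputs where Python A raises IndexError: the empty matrix
-- (matrix[0]) and ragged matrices with a row shorter than len(matrix[0]) (matrix[i][j]).
def Pre_findNumberofEndlessPoints (matrix : List (List Int)) : Prop :=
  matrix ≠ [] ∧ ∀ row ∈ matrix, (matrix.headD []).length ≤ row.length
instance (matrix : List (List Int)) : Decidable (Pre_findNumberofEndlessPoints matrix) := by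
  unfold Pre_findNumberofEndlessPoints; infer_instance

def pvWitness_findNumberofEndlessPoints : List (List Int) := [[1, 0], [1, 1]]

def Spec_findNumberofEndlessPoints (matrix : List (List Int)) (out : Int) : Prop := out = findNumberofEndlessPoints_alt matrix
instance (matrix : List (List Int)) (out : Int) : Decidable (Spec_findNumberofEndlessPoints matrix out) := by unfold Spec_findNumberofEndlessPoints; infer_instance

-- ===== CLAIM (what is proved, stated in full; the proofs are below) =====
def Claim_equal_findNumberofEndlessPoints : Prop := ∀ (matrix : List (List Int)), Dom_findNumberofEndlessPoints matrix → Pre_findNumberofEndlessPoints matrix → Spec_findNumberofEndlessPoints matrix (findNumberofEndlessPoints matrix)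

-- ===== LEMMAS AND PROOFS =====

-- right-clear: every entry of row in columns [j, cols) equals 1
def pvRf (cols : Nat) (row : List Int) (j : Nat) : Bool := ((row.take cols).drop j).all (fun x => x == 1)
-- down-clear: every row of ms has a 1 in column j
def pvDf (ms : List (List Int)) (j : Nat) : Bool := ms.all (fun row => row.getD j 0 == 1)
def pvRi (matrix : List (List Int)) (cols i j : Nat) : Bool := pvRf cols (matrix.getD i []) j
def pvDi (matrix : List (List Int)) (i j : Nat) : Bool := pvDf (matrix.drop i) j
-- A's dp cell encoding of the two flags
def pvCode (r d : Bool) : Int := if r then (if d then 3 else 1) else (if d then 2 else 0)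

-- the common functional count both programs are proved equal to
def pvNf (cols : Nat) : List (List Int) → Int
  | [] => 0
  | row :: rest => pvNf cols rest +
      (((List.range cols).filter (fun j => pvRf cols row j && pvDf (row :: rest) j)).length : Int)

-- abstract dp table
def pvMkdp (R C : Nat) (f : Nat → Nat → Int) : List (List Int) :=
  (List.range (R+1)).map (fun r => (List.range (C+1)).map (fun c => f r c))

-- dp after the init loops and after processing all rows ≥ k
def pvF (matrix : List (List Int)) (cols k r c : Nat) : Int :=
  if r = matrix.length then (if c = cols then 1 else 2)
  else if c = cols then 1
  else if k ≤ r then pvCode (pvRi matrix cols r c) (pvDi matrix r c)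
  else 0

-- dp while row k's inner loop has processed columns ≥ j
def pvH (matrix : List (List Int)) (cols k j r c : Nat) : Int :=
  if r = k ∧ j ≤ c ∧ c < cols then pvCode (pvRi matrix cols k c) (pvDi matrix k c)
  else pvF matrix cols (k+1) r c

def pvRowCnt (matrix : List (List Int)) (cols i : Nat) : Int :=
  (((List.range cols).filter (fun j => pvRi matrix cols i j && pvDi matrix i j)).length : Int)
def pvCntUpTo (matrix : List (List Int)) (cols k : Nat) : Int :=
  ((List.range k).map (pvRowCnt matrix cols)).sum

lemma pvMapRange_set {α : Type} (n j : Nat) (g : Nat → α) (v : α) (hj : j < n) :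
    ((List.range n).map g).set j v = (List.range n).map (fun c => if c = j then v else g c) := by
  apply List.ext_getElem
  · simp
  intro c h1 h2
  simp only [List.getElem_set, List.getElem_map, List.getElem_range]
  split_ifs with h3 h4 h5 <;> first | rfl | omega

lemma pvMapRange_getD {α : Type} [Inhabited α] (n j : Nat) (g : Nat → α) (d : α) (hj : j < n) :
    ((List.range n).map g).getD j d = g j := by
  rw [List.getD_eq_getElem?_getD]
  simp [hj]

lemma pvMapRange_congr {α : Type} (n : Nat) (f g : Nat → α) (h : ∀ c < n, f c = g c) :
    (List.range n).map f = (List.range n).map g := by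
  apply List.map_congr_left
  intro c hc
  exact h c (List.mem_range.mp hc)

lemma pvMkdp_get (R C : Nat) (f : Nat → Nat → Int) (i j : Nat) (hi : i ≤ R) (hj : j ≤ C) :
    pvGet2 (pvMkdp R C f) i j = f i j := by
  have h1 : i < R+1 := by omega
  have h2 : j < C+1 := by omega
  unfold pvGet2 pvMkdp
  simp [List.getD_eq_getElem?_getD, List.getElem?_range, h1, h2]

lemma pvMkdp_set (R C : Nat) (f : Nat → Nat → Int) (i j : Nat) (v : Int) (hi : i ≤ R) (hj : j ≤ C) :
    pvSet2 (pvMkdp R C f) i j v = pvMkdp R C (fun r c => if r = i ∧ c = j then v else f r c) := by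
  unfold pvSet2 pvMkdp
  have hg : (((List.range (R+1)).map (fun r => (List.range (C+1)).map (fun c => f r c))).getD i [])
      = (List.range (C+1)).map (fun c => f i c) := by
    rw [List.getD_eq_getElem (hn := by simpa using Nat.lt_succ_of_le hi)]
    simp
  rw [hg, pvMapRange_set _ _ _ _ (Nat.lt_succ_of_le hj),
      pvMapRange_set _ _ _ _ (Nat.lt_succ_of_le hi)]
  apply pvMapRange_congr
  intro r hr
  by_cases hri : r = i
  · subst hri
    simp only [if_pos rfl]
    apply pvMapRange_congr
    intro c hc
    by_cases hcj : c = j <;> simp [hcj]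
  · simp only [if_neg hri]
    apply pvMapRange_congr
    intro c hc
    simp [hri]

lemma pvMkdp_congr (R C : Nat) (f g : Nat → Nat → Int) (h : ∀ r ≤ R, ∀ c ≤ C, f r c = g r c) :
    pvMkdp R C f = pvMkdp R C g := by
  unfold pvMkdp
  apply pvMapRange_congr
  intro r hr
  apply pvMapRange_congr
  intro c hc
  exact h r (by omega) c (by omega)

lemma pvRf_ge (cols : Nat) (row : List Int) (j : Nat) (h : cols ≤ j) : pvRf cols row j = true := by
  unfold pvRf
  rw [List.drop_eq_nil_of_le (by simp [List.length_take]; omega)]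
  rfl

lemma pvRf_step (cols : Nat) (row : List Int) (j : Nat) (hj : j < cols) (hl : cols ≤ row.length) :
    pvRf cols row j = ((row.getD j 0 == 1) && pvRf cols row (j+1)) := by
  unfold pvRf
  have hlt : j < (row.take cols).length := by simp [List.length_take]; omega
  rw [List.drop_eq_getElem_cons hlt, List.all_cons]
  congr 1
  rw [List.getElem_take, List.getD_eq_getElem (hn := by omega)]

lemma pvDrop_cons (matrix : List (List Int)) (k : Nat) (hk : k < matrix.length) :
    matrix.drop k = matrix.getD k [] :: matrix.drop (k+1) := by
  rw [List.getD_eq_getElem (hn := hk)]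
  exact List.drop_eq_getElem_cons hk

lemma pvDi_step (matrix : List (List Int)) (k j : Nat) (hk : k < matrix.length) :
    pvDi matrix k j = ((pvMGet matrix k j == 1) && pvDi matrix (k+1) j) := by
  unfold pvDi pvMGet
  rw [pvDrop_cons matrix k hk]
  simp [pvDf]

lemma pvDi_len (matrix : List (List Int)) (j : Nat) : pvDi matrix matrix.length j = true := by
  unfold pvDi
  simp [pvDf]

lemma pvCode_r (r d : Bool) : ((pvCode r d == 1) || (pvCode r d == 3)) = r := by cases r <;> cases d <;> decide
lemma pvCode_d (r d : Bool) : ((pvCode r d == 2) || (pvCode r d == 3)) = d := by cases r <;> cases d <;> decide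

-- A: one step of the inner loop
lemma pvStepA (matrix : List (List Int)) (cols k t : Nat)
    (hlen : ∀ row ∈ matrix, cols ≤ row.length) (hk : k < matrix.length) (ht : t < cols) (cnt : Int) :
    pvInnerA matrix k (pvMkdp matrix.length cols (pvH matrix cols k (t+1)), cnt) t
      = (pvMkdp matrix.length cols (pvH matrix cols k t),
         cnt + (if pvRi matrix cols k t && pvDi matrix k t then 1 else 0)) := by
  have hkR : k ≤ matrix.length := Nat.le_of_lt hk
  have hk1R : k + 1 ≤ matrix.length := hk
  have htC : t ≤ cols := Nat.le_of_lt ht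
  have hrow_mem : matrix.getD k [] ∈ matrix := by
    rw [List.getD_eq_getElem (hn := hk)]; exact List.getElem_mem hk
  have hlenk : cols ≤ (matrix.getD k []).length := hlen _ hrow_mem
  have hRt0 : pvRi matrix cols k t = ((pvMGet matrix k t == 1) && pvRi matrix cols k (t+1)) := by
    unfold pvRi pvMGet; exact pvRf_step cols _ t ht hlenk
  have hDt0 : pvDi matrix k t = ((pvMGet matrix k t == 1) && pvDi matrix (k+1) t) :=
    pvDi_step matrix k t hk
  have vH_kt1 : pvH matrix cols k (t+1) k (t+1)
      = (if t + 1 = cols then 1 else pvCode (pvRi matrix cols k (t+1)) (pvDi matrix k (t+1))) := by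
    unfold pvH pvF; split_ifs <;> first | rfl | omega
  have vH_k1t : pvH matrix cols k (t+1) (k+1) t
      = (if k + 1 = matrix.length then 2 else pvCode (pvRi matrix cols (k+1) t) (pvDi matrix (k+1) t)) := by
    unfold pvH pvF; split_ifs <;> first | rfl | omega
  have vH_kt : pvH matrix cols k (t+1) k t = 0 := by
    unfold pvH pvF; split_ifs <;> first | rfl | omega
  have hHH : ∀ r c : Nat, ¬(r = k ∧ c = t) → pvH matrix cols k (t+1) r c = pvH matrix cols k t r c := by
    intro r c h; unfold pvH; split_ifs <;> first | rfl | omega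
  have hHt_kt : pvH matrix cols k t k t = pvCode (pvRi matrix cols k t) (pvDi matrix k t) := by
    unfold pvH; rw [if_pos ⟨rfl, le_refl t, ht⟩]
  obtain ⟨B1, hB1c, hB1R⟩ : ∃ B1 : Bool,
      ((pvH matrix cols k (t+1) k (t+1) == 1) || (pvH matrix cols k (t+1) k (t+1) == 3)) = B1 ∧
      pvRi matrix cols k t = ((pvMGet matrix k t == 1) && B1) := by
    by_cases hc : t + 1 = cols
    · refine ⟨true, by rw [vH_kt1, if_pos hc]; rfl, ?_⟩
      rw [hRt0]
      have : pvRi matrix cols k (t+1) = true := by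
        unfold pvRi; exact pvRf_ge _ _ _ (by omega)
      rw [this]
    · refine ⟨pvRi matrix cols k (t+1), ?_, hRt0⟩
      rw [vH_kt1, if_neg hc]
      exact pvCode_r _ _
  obtain ⟨B2, hB2c, hB2D⟩ : ∃ B2 : Bool,
      ((pvH matrix cols k (t+1) (k+1) t == 2) || (pvH matrix cols k (t+1) (k+1) t == 3)) = B2 ∧
      pvDi matrix k t = ((pvMGet matrix k t == 1) && B2) := by
    by_cases hr : k + 1 = matrix.length
    · refine ⟨true, by rw [vH_k1t, if_pos hr]; rfl, ?_⟩
      rw [hDt0]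
      have : pvDi matrix (k+1) t = true := by rw [hr]; exact pvDi_len matrix t
      rw [this]
    · refine ⟨pvDi matrix (k+1) t, ?_, hDt0⟩
      rw [vH_k1t, if_neg hr]
      exact pvCode_d _ _
  have hget : ∀ (f : Nat → Nat → Int) (i j : Nat), i ≤ matrix.length → j ≤ cols →
      pvGet2 (pvMkdp matrix.length cols f) i j = f i j := fun f i j hi hj => pvMkdp_get _ _ f i j hi hj
  have hset : ∀ (f : Nat → Nat → Int) (v : Int),
      pvSet2 (pvMkdp matrix.length cols f) k t v
        = pvMkdp matrix.length cols (fun r c => if r = k ∧ c = t then v else f r c) :=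
    fun f v => pvMkdp_set _ _ f k t v hkR htC
  have hfinal : ∀ (g : Nat → Nat → Int) (v : Int),
      (∀ r c : Nat, ¬(r = k ∧ c = t) → g r c = pvH matrix cols k (t+1) r c) →
      v = pvCode (pvRi matrix cols k t) (pvDi matrix k t) →
      pvMkdp matrix.length cols (fun r c => if r = k ∧ c = t then v else g r c)
        = pvMkdp matrix.length cols (pvH matrix cols k t) := by
    intro g v hg hv
    apply pvMkdp_congr
    intro r hr c hc
    by_cases hrc : r = k ∧ c = t
    · obtain ⟨h1, h2⟩ := hrc; subst h1; subst h2
      rw [if_pos ⟨rfl, rfl⟩, hHt_kt, hv]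
    · rw [if_neg hrc, hg r c hrc]; exact hHH r c hrc
  have hfinal0 : pvCode (pvRi matrix cols k t) (pvDi matrix k t) = 0 →
      pvMkdp matrix.length cols (pvH matrix cols k (t+1))
        = pvMkdp matrix.length cols (pvH matrix cols k t) := by
    intro hv
    apply pvMkdp_congr
    intro r hr c hc
    by_cases hrc : r = k ∧ c = t
    · obtain ⟨h1, h2⟩ := hrc; subst h1; subst h2
      rw [vH_kt, hHt_kt, hv]
    · exact hHH r c hrc
  have hcode : pvCode (pvRi matrix cols k t) (pvDi matrix k t)
      = pvCode ((pvMGet matrix k t == 1) && B1) ((pvMGet matrix k t == 1) && B2) := by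
    rw [hB1R, hB2D]
  have hpos : ((k : Nat) = k ∧ t = t) := ⟨rfl, rfl⟩
  unfold pvInnerA
  simp only [hget _ k (t+1) hkR (by omega : t+1 ≤ cols), hB1c]
  cases hm : (pvMGet matrix k t == 1) <;> cases hv1 : B1
  · simp only [hv1, Bool.false_eq_true, if_false]
    rw [hget _ (k+1) t hk1R htC, hB2c]
    have hc0 : pvCode (pvRi matrix cols k t) (pvDi matrix k t) = 0 := by
      rw [hcode, hm, hv1]; rfl
    cases hv2 : B2 <;> simp only [hv2, hm, Bool.false_eq_true, if_false, if_true] <;>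
      rw [hget _ k t hkR htC, vH_kt, hfinal0 hc0] <;> simp [hB1R, hB2D, hm, hHt_kt, pvCode]
  · simp only [hv1, if_true, hm, Bool.false_eq_true, if_false]
    rw [hget _ (k+1) t hk1R htC, hB2c]
    have hc0 : pvCode (pvRi matrix cols k t) (pvDi matrix k t) = 0 := by
      rw [hcode, hm]; rfl
    cases hv2 : B2 <;> simp only [hv2, hm, Bool.false_eq_true, if_false, if_true] <;>
      rw [hget _ k t hkR htC, vH_kt, hfinal0 hc0] <;> simp [hB1R, hB2D, hm, hHt_kt, pvCode]
  · simp only [hv1, Bool.false_eq_true, if_false]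
    rw [hget _ (k+1) t hk1R htC, hB2c]
    cases hv2 : B2
    · try simp only [hv2, Bool.false_eq_true, if_false]
      have hc0 : pvCode (pvRi matrix cols k t) (pvDi matrix k t) = 0 := by
        rw [hcode, hm, hv1, hv2]; rfl
      rw [hget _ k t hkR htC, vH_kt, hfinal0 hc0]
      simp [hB1R, hB2D, hm, hv1, hv2, hHt_kt, pvCode]
    · simp only [hv2, if_true, hm]
      rw [hget _ k t hkR htC, vH_kt]
      simp only [show ((0:Int) == 1) = false from rfl, Bool.false_eq_true, if_false]
      rw [hset]
      rw [hfinal _ 2 (fun r c h => rfl) (by rw [hcode, hm, hv1, hv2]; rfl)]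
      rw [hget _ k t hkR htC]
      try simp only []
      try simp only [if_pos hpos]
      try simp only [show (k = k ∧ True) = True from by simp, if_true]
      try simp only [show (True ∧ True) = True from by simp, if_true]
      simp [hB1R, hB2D, hm, hv1, hv2, hHt_kt, pvCode]
  · simp only [hv1, if_true, hm]
    rw [hset, hget _ (k+1) t hk1R htC]
    simp only []
    rw [if_neg (show ¬(k + 1 = k ∧ True) from by simp)]
    rw [hB2c]
    cases hv2 : B2
    · simp only [hv2, Bool.false_eq_true, if_false]
      rw [hfinal _ 1 (fun r c h => rfl) (by rw [hcode, hm, hv1, hv2]; rfl)]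
      rw [hget _ k t hkR htC]
      try simp only []
      try simp only [if_pos hpos]
      try simp only [show (k = k ∧ True) = True from by simp, if_true]
      try simp only [show (True ∧ True) = True from by simp, if_true]
      simp [hB1R, hB2D, hm, hv1, hv2, hHt_kt, pvCode]
    · simp only [hv2, if_true, hm]
      rw [hget _ k t hkR htC]
      try simp only []
      try simp only [if_pos hpos]
      try simp only [show (k = k ∧ True) = True from by simp, if_true]
      try simp only [show (True ∧ True) = True from by simp, if_true]
      try simp only [show ((1:Int) == 1) = true from rfl, if_true]
      rw [hset]
      rw [hfinal _ 3 (fun r c h => by rw [if_neg h]) (by rw [hcode, hm, hv1, hv2]; rfl)]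
      rw [hget _ k t hkR htC]
      try simp only []
      try simp only [if_pos hpos]
      try simp only [show (k = k ∧ True) = True from by simp, if_true]
      try simp only [show (True ∧ True) = True from by simp, if_true]
      simp [hB1R, hB2D, hm, hv1, hv2, hHt_kt, pvCode]

-- A: the whole inner loop of row k
lemma pvInnerALoop (matrix : List (List Int)) (cols k : Nat)
    (hlen : ∀ row ∈ matrix, cols ≤ row.length) (hk : k < matrix.length) :
    ∀ t, t ≤ cols → ∀ cnt : Int,
    ((List.range t).reverse).foldl (pvInnerA matrix k) (pvMkdp matrix.length cols (pvH matrix cols k t), cnt)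
      = (pvMkdp matrix.length cols (pvH matrix cols k 0),
         cnt + (((List.range t).filter (fun j => pvRi matrix cols k j && pvDi matrix k j)).length : Int)) := by
  intro t
  induction t with
  | zero => intro _ cnt; simp
  | succ t IH =>
    intro h cnt
    rw [List.range_succ, List.reverse_append]
    simp only [List.reverse_cons, List.reverse_nil, List.nil_append, List.singleton_append,
      List.foldl_cons]
    rw [pvStepA matrix cols k t hlen hk (by omega) cnt, IH (by omega) _]
    simp only [Prod.mk.injEq, List.filter_append, List.length_append]
    refine ⟨trivial, ?_⟩
    push_cast
    by_cases hP : (pvRi matrix cols k t && pvDi matrix k t) = true <;> simp [hP] <;> ring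

-- A: the outer loop
lemma pvOuterA (matrix : List (List Int)) (cols : Nat)
    (hlen : ∀ row ∈ matrix, cols ≤ row.length) :
    ∀ k, k ≤ matrix.length → ∀ cnt : Int,
    ((List.range k).reverse).foldl
        (fun st i => ((List.range cols).reverse).foldl (pvInnerA matrix i) st)
        (pvMkdp matrix.length cols (pvF matrix cols k), cnt)
      = (pvMkdp matrix.length cols (pvF matrix cols 0), cnt + pvCntUpTo matrix cols k) := by
  intro k
  induction k with
  | zero => intro _ cnt; simp [pvCntUpTo]
  | succ k IH =>
    intro h cnt
    rw [List.range_succ, List.reverse_append]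
    simp only [List.reverse_cons, List.reverse_nil, List.nil_append, List.singleton_append,
      List.foldl_cons]
    have hstart : pvMkdp matrix.length cols (pvF matrix cols (k+1))
        = pvMkdp matrix.length cols (pvH matrix cols k cols) := by
      apply pvMkdp_congr
      intro r hr c hc
      unfold pvH
      split_ifs <;> first | rfl | omega
    have hend : pvMkdp matrix.length cols (pvH matrix cols k 0)
        = pvMkdp matrix.length cols (pvF matrix cols k) := by
      apply pvMkdp_congr
      intro r hr c hc
      by_cases hrk : r = k
      · subst hrk
        unfold pvH pvF
        split_ifs <;> first | rfl | omega
      · unfold pvH pvF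
        split_ifs <;> first | rfl | omega
    rw [hstart, pvInnerALoop matrix cols k hlen (by omega) cols le_rfl cnt, hend, IH (by omega)]
    simp only [Prod.mk.injEq]
    refine ⟨trivial, ?_⟩
    unfold pvCntUpTo pvRowCnt
    rw [List.range_succ, List.map_append, List.sum_append]
    simp
    ring

-- the init loops build pvF matrix cols matrix.length
lemma pvInitRow (R C : Nat) (f : Nat → Nat → Int) :
    ∀ t, t ≤ C + 1 →
    (List.range t).foldl (fun dp x => pvSet2 dp R x 2) (pvMkdp R C f)
      = pvMkdp R C (fun r c => if r = R ∧ c < t then 2 else f r c) := by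
  intro t
  induction t with
  | zero =>
    intro _
    simp only [List.range_zero, List.foldl_nil]
    apply pvMkdp_congr; intro r hr c hc; simp
  | succ t IH =>
    intro h
    rw [List.range_succ, List.foldl_append, IH (by omega)]
    simp only [List.foldl_cons, List.foldl_nil]
    rw [pvMkdp_set R C _ R t 2 le_rfl (by omega)]
    apply pvMkdp_congr
    intro r hr c hc
    split_ifs with h1 h2 h3 <;> first | rfl | omega

lemma pvInitCol (R C : Nat) (f : Nat → Nat → Int) :
    ∀ t, t ≤ R + 1 →
    (List.range t).foldl (fun dp x => pvSet2 dp x C 1) (pvMkdp R C f)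
      = pvMkdp R C (fun r c => if r < t ∧ c = C then 1 else f r c) := by
  intro t
  induction t with
  | zero =>
    intro _
    simp only [List.range_zero, List.foldl_nil]
    apply pvMkdp_congr; intro r hr c hc; simp
  | succ t IH =>
    intro h
    rw [List.range_succ, List.foldl_append, IH (by omega)]
    simp only [List.foldl_cons, List.foldl_nil]
    rw [pvMkdp_set R C _ t C 1 (by omega) le_rfl]
    apply pvMkdp_congr
    intro r hr c hc
    split_ifs with h1 h2 h3 <;> first | rfl | omega

lemma pvCnt_Nf (matrix : List (List Int)) (cols : Nat) :
    ∀ k, k ≤ matrix.length →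
    pvCntUpTo matrix cols k + pvNf cols (matrix.drop k) = pvNf cols matrix := by
  intro k
  induction k with
  | zero => intro _; simp [pvCntUpTo]
  | succ k IH =>
    intro h
    have hk : k < matrix.length := by omega
    have hstep : pvNf cols (matrix.drop k) = pvNf cols (matrix.drop (k+1)) + pvRowCnt matrix cols k := by
      rw [pvDrop_cons matrix k hk]
      simp only [pvNf]
      unfold pvRowCnt pvRi pvDi
      rw [pvDrop_cons matrix k hk]
    have hsucc : pvCntUpTo matrix cols (k+1) = pvCntUpTo matrix cols k + pvRowCnt matrix cols k := by
      unfold pvCntUpTo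
      rw [List.range_succ, List.map_append, List.sum_append]
      simp
    rw [hsucc]
    linarith [IH (by omega), hstep]

theorem pvA_eq_Nf (matrix : List (List Int))
    (hlen : ∀ row ∈ matrix, (matrix.headD []).length ≤ row.length) :
    findNumberofEndlessPoints matrix = pvNf (matrix.headD []).length matrix := by
  simp only [findNumberofEndlessPoints]
  have h0 : (List.range (matrix.length+1)).map (fun _ => List.replicate ((matrix.headD []).length+1) (0:Int))
      = pvMkdp matrix.length (matrix.headD []).length (fun _ _ => 0) := by
    unfold pvMkdp
    apply pvMapRange_congr
    intro r hr
    apply List.ext_getElem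
    · simp
    intro c h1 h2
    simp
  rw [h0]
  rw [pvInitRow matrix.length (matrix.headD []).length _ ((matrix.headD []).length + 1) le_rfl]
  rw [pvInitCol matrix.length (matrix.headD []).length _ (matrix.length + 1) le_rfl]
  have hF : pvMkdp matrix.length (matrix.headD []).length
      (fun r c => if r < matrix.length + 1 ∧ c = (matrix.headD []).length then 1
        else if r = matrix.length ∧ c < (matrix.headD []).length + 1 then 2 else 0)
      = pvMkdp matrix.length (matrix.headD []).length
          (pvF matrix (matrix.headD []).length matrix.length) := by
    apply pvMkdp_congr
    intro r hr c hc
    unfold pvF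
    split_ifs <;> first | rfl | omega
  rw [hF]
  rw [pvOuterA matrix (matrix.headD []).length hlen matrix.length le_rfl 0]
  have hbridge := pvCnt_Nf matrix (matrix.headD []).length matrix.length le_rfl
  rw [List.drop_length] at hbridge
  simp only [pvNf, add_zero] at hbridge
  simpa using hbridge

-- ===== B-side lemmas =====

-- generic: all of a drop, stated through getD
lemma pv_all_drop {α : Type} (p : α → Bool) (xs : List α) (k : Nat) (d : α) :
    ((xs.drop k).all p = true) ↔ (∀ t, k ≤ t → t < xs.length → p (xs.getD t d) = true) := by
  rw [List.all_eq_true]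
  constructor
  · intro h t hk ht
    have hdl : t - k < (xs.drop k).length := by simp [List.length_drop]; omega
    have hm : xs.getD t d ∈ xs.drop k := by
      rw [List.getD_eq_getElem _ _ ht]
      have : xs[t] = (xs.drop k)[t-k]'hdl := by
        rw [List.getElem_drop]; congr 1; omega
      rw [this]; exact List.getElem_mem _
    exact h _ hm
  · intro h x hx
    obtain ⟨m, hm, rfl⟩ := List.mem_iff_getElem.mp hx
    have hml : k + m < xs.length := by simp [List.length_drop] at hm; omega
    have : (xs.drop k)[m] = xs.getD (k+m) d := by
      rw [List.getElem_drop, List.getD_eq_getElem _ _ hml]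
    rw [this]; exact h _ (by omega) hml

-- pvRf through getD (needs cols ≤ row.length)
lemma pvRf_iff (cols : Nat) (row : List Int) (j : Nat) (hl : cols ≤ row.length) :
    pvRf cols row j = true ↔ ∀ t, j ≤ t → t < cols → row.getD t 0 = 1 := by
  unfold pvRf
  rw [pv_all_drop _ _ _ (0:Int)]
  have hlen : (row.take cols).length = cols := by simp [List.length_take]; omega
  have hg : ∀ t, t < cols → (row.take cols).getD t 0 = row.getD t 0 := by
    intro t ht
    rw [List.getD_eq_getElem _ _ (by rw [hlen]; exact ht), List.getElem_take,
      List.getD_eq_getElem _ _ (by omega)]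
  constructor
  · intro h t h1 h2
    have := h t h1 (by rw [hlen]; exact h2)
    rw [hg t h2] at this
    simpa using this
  · intro h t h1 h2
    rw [hlen] at h2
    rw [hg t h2]
    simpa using h t h1 h2

-- pvDi through pvMGet
lemma pvDi_iff (matrix : List (List Int)) (k j : Nat) :
    pvDi matrix k j = true ↔ ∀ t, k ≤ t → t < matrix.length → pvMGet matrix t j = 1 := by
  unfold pvDi pvDf pvMGet
  rw [pv_all_drop _ _ _ ([] : List Int)]
  simp [beq_iff_eq]

-- B's scan computes the least clear start index
lemma pvScanLast_le_iff (f : Nat → Int) :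
    ∀ n j : Nat, (pvScanLast n f ≤ j ↔ ∀ t, j ≤ t → t < n → f t = 1) := by
  intro n
  induction n with
  | zero =>
    intro j
    unfold pvScanLast
    simp only [List.range_zero, List.foldl_nil]
    exact ⟨fun _ t _ ht => absurd ht (by omega), fun _ => Nat.zero_le j⟩
  | succ c IH =>
    intro j
    have hrec : pvScanLast (c+1) f = if f c ≠ 1 then c + 1 else pvScanLast c f := by
      unfold pvScanLast
      rw [List.range_succ, List.foldl_append]
      simp
    rw [hrec]
    split_ifs with hz
    · constructor
      · intro h t h1 h2
        exact absurd h2 (by omega)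
      · intro h
        by_contra h'
        exact hz (h c (by omega) (by omega))
    · push_neg at hz
      rw [IH j]
      constructor
      · intro h t h1 h2
        by_cases htc : t = c
        · subst htc; exact hz
        · exact h t h1 (by omega)
      · intro h t h1 h2
        exact h t h1 (by omega)

-- fold of per-row counts = sum of the map
lemma pvFoldSum (g : Nat → Int) :
    ∀ n : Nat, (List.range n).foldl (fun acc i => acc + g i) 0 = ((List.range n).map g).sum := by
  intro n
  induction n with
  | zero => simp
  | succ n IH =>
    rw [List.range_succ, List.foldl_append, List.map_append, List.sum_append, IH]
    simp

theorem pvB_eq_Nf (matrix : List (List Int))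
    (hlen : ∀ row ∈ matrix, (matrix.headD []).length ≤ row.length) :
    findNumberofEndlessPoints_alt matrix = pvNf (matrix.headD []).length matrix := by
  simp only [findNumberofEndlessPoints_alt]
  set cols := (matrix.headD []).length with hcols
  rw [pvFoldSum]
  have hrow : ∀ i, i < matrix.length →
      ((matrix.map (fun row => pvScanLast cols (fun j => row.getD j 0))).getD i 0
        = pvScanLast cols (fun j => (matrix.getD i []).getD j 0)) := by
    intro i hi
    rw [List.getD_eq_getElem _ _ (by simpa using hi), List.getElem_map,
      List.getD_eq_getElem _ _ hi]
  have hcol : ∀ j, j < cols →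
      (((List.range cols).map (fun j => pvScanLast matrix.length (fun i => pvMGet matrix i j))).getD j 0
        = pvScanLast matrix.length (fun i => pvMGet matrix i j)) := by
    intro j hj
    exact pvMapRange_getD cols j _ 0 hj
  have hpred : ∀ i, i < matrix.length → ∀ j, j < cols →
      ((decide ((matrix.map (fun row => pvScanLast cols (fun j => row.getD j 0))).getD i 0 ≤ j) &&
        decide (((List.range cols).map (fun j => pvScanLast matrix.length (fun i => pvMGet matrix i j))).getD j 0 ≤ i))
        = (pvRi matrix cols i j && pvDi matrix i j)) := by
    intro i hi j hj
    rw [hrow i hi, hcol j hj]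
    have hmem : matrix.getD i [] ∈ matrix := by
      rw [List.getD_eq_getElem (hn := hi)]; exact List.getElem_mem hi
    have h1 : decide (pvScanLast cols (fun j => (matrix.getD i []).getD j 0) ≤ j) = pvRi matrix cols i j := by
      have hiff : (pvScanLast cols (fun j => (matrix.getD i []).getD j 0) ≤ j) ↔ pvRi matrix cols i j = true := by
        rw [pvScanLast_le_iff, pvRi, pvRf_iff cols _ j (hlen _ hmem)]
      cases hv : pvRi matrix cols i j
      · have hn : ¬ (pvScanLast cols (fun j => (matrix.getD i []).getD j 0) ≤ j) := by
          rw [hiff, hv]; exact Bool.false_ne_true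
        exact decide_eq_false hn
      · exact decide_eq_true (hiff.mpr hv)
    have h2 : decide (pvScanLast matrix.length (fun i => pvMGet matrix i j) ≤ i) = pvDi matrix i j := by
      have hiff : (pvScanLast matrix.length (fun i => pvMGet matrix i j) ≤ i) ↔ pvDi matrix i j = true := by
        rw [pvScanLast_le_iff, pvDi_iff]
      cases hv : pvDi matrix i j
      · have hn : ¬ (pvScanLast matrix.length (fun i => pvMGet matrix i j) ≤ i) := by
          rw [hiff, hv]; exact Bool.false_ne_true
        exact decide_eq_false hn
      · exact decide_eq_true (hiff.mpr hv)
    rw [h1, h2]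
  have hmapeq : (List.range matrix.length).map (fun i =>
        (((List.range cols).filter
          (fun j => decide ((matrix.map (fun row => pvScanLast cols (fun j => row.getD j 0))).getD i 0 ≤ j) &&
            decide (((List.range cols).map (fun j => pvScanLast matrix.length (fun i => pvMGet matrix i j))).getD j 0 ≤ i))).length : Int))
      = (List.range matrix.length).map (pvRowCnt matrix cols) := by
    apply pvMapRange_congr
    intro i hi
    unfold pvRowCnt
    congr 1
    congr 1
    apply List.filter_congr
    intro j hj
    exact hpred i hi j (List.mem_range.mp hj)
  rw [hmapeq]
  have := pvCnt_Nf matrix cols matrix.length le_rfl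
  rw [List.drop_length] at this
  simp only [pvNf, add_zero] at this
  rw [← this]
  rfl

-- ===== VERDICT (by name: the statement is the Claim_ definition above) =====
theorem findNumberofEndlessPoints_spec : Claim_equal_findNumberofEndlessPoints := by
  intro matrix _ hpre
  unfold Spec_findNumberofEndlessPoints
  rw [pvA_eq_Nf matrix hpre.2, pvB_eq_Nf matrix hpre.2]
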